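-- pv_equiv track=rewrite | github.com/ArtsemDev/belhard63git | lesson7.py | sum_of_neighbors
-- ===== SOURCE A (Python) =====
-- def sum_of_neighbors(numbers: list[int]) -> list[int]:
--     result = []
--     for i in range(len(numbers)):
--         if i == len(numbers) - 1:
--             result.append(numbers[i-1] + numbers[0])
--         else:
--             result.append(numbers[i-1] + numbers[i+1])
--     return result
-- ===== SOURCE B (Python) =====
-- def sum_of_neighbors(numbers: list[int]) -> list[int]:
--     prev = numbers[-1:] + numbers[:-1]
--     nxt = numbers[1:] + numbers[:1]
--     return [p + n for p, n in zip(prev, nxt)]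
-- ===== Notes on version B (the rewrite author's own statement) =====
-- stated objective: idiomatic
-- what changed: Replaces the index loop with its last-element branch by materializing two rotated copies of the list (left-neighbor and right-neighbor sequences) and summing them elementwise with zip.
import Mathlib
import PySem

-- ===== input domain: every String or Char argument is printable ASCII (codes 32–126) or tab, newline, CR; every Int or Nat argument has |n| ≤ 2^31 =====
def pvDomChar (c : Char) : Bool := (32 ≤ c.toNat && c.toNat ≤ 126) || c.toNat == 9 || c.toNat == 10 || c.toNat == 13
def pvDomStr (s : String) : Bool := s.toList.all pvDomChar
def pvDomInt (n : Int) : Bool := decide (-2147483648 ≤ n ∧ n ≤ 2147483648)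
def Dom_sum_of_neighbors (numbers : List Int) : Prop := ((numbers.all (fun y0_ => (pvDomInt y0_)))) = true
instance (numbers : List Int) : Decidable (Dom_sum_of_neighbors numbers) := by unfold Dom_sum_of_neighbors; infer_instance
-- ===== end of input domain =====

-- B replaces A's index loop and last-element branch by two rotated copies of the
-- list summed elementwise (idiomatic; same O(n) cost, return values identical).

-- ===== PORT A =====
-- the loop indexes numbers[i-1], numbers[0], numbers[i+1]; all are always in
-- range for i in range(len(numbers)), so the pyGetD default 0 is never used
def sum_of_neighbors (numbers : List Int) : List Int :=
  (PySem.List.pyRange 0 (numbers.length : Int) 1).foldl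
    (fun result i =>
      if i == (numbers.length : Int) - 1 then
        result ++ [PySem.List.pyGetD numbers (i - 1) 0 + PySem.List.pyGetD numbers 0 0]
      else
        result ++ [PySem.List.pyGetD numbers (i - 1) 0 + PySem.List.pyGetD numbers (i + 1) 0]) []

-- ===== PORT B =====
def sum_of_neighbors_alt (numbers : List Int) : List Int :=
  ((PySem.List.slice numbers (some (-1)) none ++ PySem.List.slice numbers none (some (-1))).zip
    (PySem.List.slice numbers (some 1) none ++ PySem.List.slice numbers none (some 1))).map
    (fun p => p.1 + p.2)

-- ===== PRECONDITION & SPEC =====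
def Spec_sum_of_neighbors (numbers : List Int) (out : List Int) : Prop := out = sum_of_neighbors_alt numbers
instance (numbers : List Int) (out : List Int) : Decidable (Spec_sum_of_neighbors numbers out) := by unfold Spec_sum_of_neighbors; infer_instance

-- ===== CLAIM (what is proved, stated in full; the proofs are below) =====
def Claim_equal_sum_of_neighbors : Prop := ∀ (numbers : List Int), Dom_sum_of_neighbors numbers → Spec_sum_of_neighbors numbers (sum_of_neighbors numbers)

-- ===== LEMMAS AND PROOFS =====

theorem sum_of_neighbors_eq_alt (xs : List Int) :
    sum_of_neighbors xs = sum_of_neighbors_alt xs := by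
  unfold sum_of_neighbors sum_of_neighbors_alt
  have hcongr : ∀ (acc : List Int) (i : Int),
      (if i == (xs.length : Int) - 1 then
        acc ++ [PySem.List.pyGetD xs (i - 1) 0 + PySem.List.pyGetD xs 0 0]
      else
        acc ++ [PySem.List.pyGetD xs (i - 1) 0 + PySem.List.pyGetD xs (i + 1) 0]) =
      acc ++ [if i == (xs.length : Int) - 1 then
        PySem.List.pyGetD xs (i - 1) 0 + PySem.List.pyGetD xs 0 0
      else PySem.List.pyGetD xs (i - 1) 0 + PySem.List.pyGetD xs (i + 1) 0] := by
    intro acc i; split <;> rfl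
  have hs1 : PySem.List.slice xs none (some 1) = List.take 1 xs := by
    have := PySem.List.slice_to xs (b := (1:Int)) (by omega)
    simpa using this
  simp only [hcongr]
  rw [PySem.List.pyRange_zero_natCast, List.foldl_map, PySem.List.foldl_append_singleton_eq_map,
    PySem.List.slice_from_neg_one, PySem.List.slice_to_neg_one, PySem.List.slice_from_one, hs1]
  simp only [List.nil_append]
  rcases List.eq_nil_or_concat' xs with hnil | hcc
  · subst hnil; simp
  have hne : xs ≠ [] := by rcases hcc with ⟨ys, y, rfl⟩; simp
  have hn1 : 1 ≤ xs.length := List.length_pos_iff.mpr hne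
  have hplen : (List.drop (xs.length - 1) xs).length = 1 := by simp; omega
  have htlen : xs.tail.length = xs.length - 1 := List.length_tail ..
  have hklen : (List.take 1 xs).length = 1 := by simp; omega
  apply List.ext_getElem
  · simp only [List.length_map, List.length_zip, List.length_append, hplen, htlen, hklen,
      List.length_range, List.length_dropLast]
    omega
  · intro i h1 h2
    have hi : i < xs.length := by simpa using h1
    simp only [List.getElem_map, List.getElem_range, List.getElem_zip]
    have hprev : (List.drop (xs.length - 1) xs ++ xs.dropLast)[i]'(by
        rw [List.length_append, hplen, List.length_dropLast]; omega) =
        if i = 0 then xs.getD (xs.length - 1) 0 else xs.getD (i - 1) 0 := by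
      rw [List.getElem_append]
      by_cases h0 : i = 0
      · rw [dif_pos (by omega), if_pos h0, List.getElem_drop,
          List.getD_eq_getElem xs 0 (by omega)]
        congr 1
        omega
      · rw [dif_neg (by omega), if_neg h0, List.getElem_dropLast,
          List.getD_eq_getElem xs 0 (by omega)]
        congr 1
        omega
    have hnxt : (xs.tail ++ List.take 1 xs)[i]'(by
        rw [List.length_append, htlen, hklen]; omega) =
        if i = xs.length - 1 then xs.getD 0 0 else xs.getD (i + 1) 0 := by
      rw [List.getElem_append]
      by_cases hl : i = xs.length - 1
      · rw [dif_neg (by omega), if_pos hl, List.getElem_take,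
          List.getD_eq_getElem xs 0 (by omega)]
        congr 1
        omega
      · rw [dif_pos (by omega), if_neg hl, List.getElem_tail,
          List.getD_eq_getElem xs 0 (by omega)]
    have hm1 : ¬ i = 0 → PySem.List.pyGetD xs ((i:Int) - 1) 0 = xs.getD (i - 1) 0 := by
      intro h0
      have h : ((i:Int) - 1) = ((i - 1 : Nat) : Int) := by omega
      rw [h, PySem.List.pyGetD_natCast]
    have hp1 : PySem.List.pyGetD xs ((i:Int) + 1) 0 = xs.getD (i + 1) 0 := by
      have h : ((i:Int) + 1) = ((i + 1 : Nat) : Int) := by omega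
      rw [h, PySem.List.pyGetD_natCast]
    have hm0 : i = 0 → PySem.List.pyGetD xs ((i:Int) - 1) 0 = xs.getD (xs.length - 1) 0 := by
      intro h0
      have h : ((i:Int) - 1) = -1 := by omega
      rw [h, PySem.List.pyGetD_neg_one xs 0 hne, List.getLast_eq_getElem,
        List.getD_eq_getElem xs 0 (by omega)]
    rw [hprev, hnxt]
    by_cases hl : i = xs.length - 1
    · rw [if_pos (show ((i:Int) == (xs.length:Int) - 1) = true by simp; omega), if_pos hl,
        PySem.List.pyGetD_zero]
      by_cases h0 : i = 0
      · rw [if_pos h0, hm0 h0]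
      · rw [if_neg h0, hm1 h0]
    · rw [if_neg (show ¬ ((i:Int) == (xs.length:Int) - 1) = true by simp; omega), if_neg hl, hp1]
      by_cases h0 : i = 0
      · rw [if_pos h0, hm0 h0]
      · rw [if_neg h0, hm1 h0]

-- ===== VERDICT (by name: the statement is the Claim_ definition above) =====
theorem sum_of_neighbors_spec : Claim_equal_sum_of_neighbors := by
  intro numbers _
  exact sum_of_neighbors_eq_alt numbers
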